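-- pv_equiv track=rewrite | github.com/mulasik/wta | wta/visualisation.py | assign_color_to_number_versions
-- ===== SOURCE A (Python) =====
-- def assign_color_to_number_versions(number_versions):
--     colors = []
--     for nv in number_versions:
--         if nv == 1:
--             colors.append('grey')
--         if 1 < nv <= 10:
--             colors.append('pink')
--         if 10 < nv <= 15:
--             colors.append('indianred')
--         if 15 < nv <= 20:
--             colors.append('firebrick')
--         if nv > 20:
--             colors.append('darkred')
--     return colors
-- ===== SOURCE B (Python) =====
-- import bisect
--
-- def assign_color_to_number_versions(number_versions):
--     boundaries = [1, 10, 15, 20]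
--     palette = ['grey', 'pink', 'indianred', 'firebrick', 'darkred']
--     colors = []
--     for nv in number_versions:
--         if nv < 1:
--             continue
--         colors.append(palette[bisect.bisect_left(boundaries, nv)])
--     return colors
-- ===== Notes on version B (the rewrite author's own statement) =====
-- stated objective: idiomatic
-- what changed: The chain of five disjoint range tests per element is replaced by a sorted threshold table with a parallel palette, indexed by bisect_left; values below the lowest threshold are skipped exactly as A drops them.
import Mathlib
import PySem

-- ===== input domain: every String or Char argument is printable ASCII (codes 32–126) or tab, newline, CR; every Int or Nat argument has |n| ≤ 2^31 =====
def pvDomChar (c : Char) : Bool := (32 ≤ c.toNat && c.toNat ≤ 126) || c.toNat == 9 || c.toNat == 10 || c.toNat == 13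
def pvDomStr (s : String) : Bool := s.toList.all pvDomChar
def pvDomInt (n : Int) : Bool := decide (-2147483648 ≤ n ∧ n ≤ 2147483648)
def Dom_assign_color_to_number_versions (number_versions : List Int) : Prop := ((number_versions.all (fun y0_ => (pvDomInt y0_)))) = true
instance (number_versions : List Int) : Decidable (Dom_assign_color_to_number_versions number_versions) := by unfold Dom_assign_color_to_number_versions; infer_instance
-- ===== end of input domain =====

-- B replaces A's chain of five range tests with a sorted threshold table consulted by
-- bisect_left (ported as a count of strictly smaller thresholds); same O(n) cost, more idiomatic.

-- ===== PORT A =====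
def assign_color_to_number_versions (number_versions : List Int) : List String :=
  number_versions.foldl (fun colors nv =>
    let colors := if nv = 1 then colors ++ ["grey"] else colors
    let colors := if 1 < nv ∧ nv ≤ 10 then colors ++ ["pink"] else colors
    let colors := if 10 < nv ∧ nv ≤ 15 then colors ++ ["indianred"] else colors
    let colors := if 15 < nv ∧ nv ≤ 20 then colors ++ ["firebrick"] else colors
    if 20 < nv then colors ++ ["darkred"] else colors) []

-- ===== PORT B =====
-- bisect.bisect_left on a sorted list = number of elements strictly below x
def pvBisectLeft (bs : List Int) (x : Int) : Nat := bs.countP (fun b => decide (b < x))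

-- palette[idx] is always in range (idx ≤ 4 < 5), so pyGet? is always `some` here
def assign_color_to_number_versions_alt (number_versions : List Int) : List String :=
  number_versions.filterMap (fun nv =>
    if nv < 1 then none
    else PySem.List.pyGet? ["grey", "pink", "indianred", "firebrick", "darkred"]
      (pvBisectLeft [1, 10, 15, 20] nv))

-- ===== PRECONDITION & SPEC =====
def Spec_assign_color_to_number_versions (number_versions : List Int) (out : List String) : Prop := out = assign_color_to_number_versions_alt number_versions
instance (number_versions : List Int) (out : List String) : Decidable (Spec_assign_color_to_number_versions number_versions out) := by unfold Spec_assign_color_to_number_versions; infer_instance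

-- ===== CLAIM (what is proved, stated in full; the proofs are below) =====
def Claim_equal_assign_color_to_number_versions : Prop := ∀ (number_versions : List Int), Dom_assign_color_to_number_versions number_versions → Spec_assign_color_to_number_versions number_versions (assign_color_to_number_versions number_versions)

-- ===== LEMMAS AND PROOFS =====

-- the Option B's per-element lookup produces
def pvColor (nv : Int) : Option String :=
  if nv < 1 then none
  else PySem.List.pyGet? ["grey", "pink", "indianred", "firebrick", "darkred"]
    (pvBisectLeft [1, 10, 15, 20] nv)

lemma step_eq (acc : List String) (nv : Int) :
    ((let c1 := if nv = 1 then acc ++ ["grey"] else acc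
      let c2 := if 1 < nv ∧ nv ≤ 10 then c1 ++ ["pink"] else c1
      let c3 := if 10 < nv ∧ nv ≤ 15 then c2 ++ ["indianred"] else c2
      let c4 := if 15 < nv ∧ nv ≤ 20 then c3 ++ ["firebrick"] else c3
      if 20 < nv then c4 ++ ["darkred"] else c4) : List String)
    = acc ++ (pvColor nv).toList := by
  rcases (by omega : nv < 1 ∨ nv = 1 ∨ (1 < nv ∧ nv ≤ 10) ∨ (10 < nv ∧ nv ≤ 15) ∨
      (15 < nv ∧ nv ≤ 20) ∨ 20 < nv) with h0 | h1 | h2 | h3 | h4 | h5 <;>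
    [skip;skip;skip;skip;skip;skip]
  · simp [pvColor, (show ¬ nv = 1 by omega), (show nv < 1 by omega), (show ¬ 1 < nv by omega), (show ¬ 10 < nv by omega), (show ¬ 15 < nv by omega), (show ¬ 20 < nv by omega)]
  · simp [pvColor, pvBisectLeft, List.countP, List.countP.go, (show nv = 1 by omega)]
  · simp [pvColor, pvBisectLeft, List.countP, List.countP.go, (show ¬ nv = 1 by omega), (show ¬ nv < 1 by omega), (show 1 < nv by omega), (show nv ≤ 10 by omega), (show ¬ 10 < nv by omega), (show ¬ 15 < nv by omega), (show ¬ 20 < nv by omega)]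
  · simp [pvColor, pvBisectLeft, List.countP, List.countP.go, (show ¬ nv = 1 by omega), (show ¬ nv < 1 by omega), (show 1 < nv by omega), (show 10 < nv by omega), (show nv ≤ 15 by omega), (show ¬ 15 < nv by omega), (show ¬ 20 < nv by omega)]
  · simp [pvColor, pvBisectLeft, List.countP, List.countP.go, (show ¬ nv = 1 by omega), (show ¬ nv < 1 by omega), (show 1 < nv by omega), (show 10 < nv by omega), (show 15 < nv by omega), (show nv ≤ 20 by omega), (show ¬ 20 < nv by omega), (show ¬ nv ≤ 15 by omega), (show ¬ nv ≤ 10 by omega)]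
  · simp [pvColor, pvBisectLeft, List.countP, List.countP.go, (show ¬ nv = 1 by omega), (show ¬ nv < 1 by omega), (show 1 < nv by omega), (show 10 < nv by omega), (show 15 < nv by omega), (show 20 < nv by omega), (show ¬ nv ≤ 20 by omega), (show ¬ nv ≤ 15 by omega), (show ¬ nv ≤ 10 by omega)]

lemma foldl_eq (l : List Int) (acc : List String) :
    l.foldl (fun colors nv =>
      let colors := if nv = 1 then colors ++ ["grey"] else colors
      let colors := if 1 < nv ∧ nv ≤ 10 then colors ++ ["pink"] else colors
      let colors := if 10 < nv ∧ nv ≤ 15 then colors ++ ["indianred"] else colors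
      let colors := if 15 < nv ∧ nv ≤ 20 then colors ++ ["firebrick"] else colors
      if 20 < nv then colors ++ ["darkred"] else colors) acc
    = acc ++ l.filterMap pvColor := by
  induction l generalizing acc with
  | nil => simp
  | cons x xs ih =>
    simp only [List.foldl_cons, List.filterMap_cons]
    rw [ih, step_eq]
    cases h : pvColor x <;> simp

-- ===== VERDICT (by name: the statement is the Claim_ definition above) =====
theorem assign_color_to_number_versions_spec : Claim_equal_assign_color_to_number_versions := by
  intro l _
  show _ = _
  rw [assign_color_to_number_versions, assign_color_to_number_versions_alt, foldl_eq]
  simp [pvColor]
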